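-- pv_equiv track=rewrite | github.com/sainas/LeetCode | contest1028.py | baseNeg2
-- ===== SOURCE A (Python) =====
-- def baseNeg2(N: int) -> str:
--     if not N:
--         return "0"
--     lst=[]
--     while N:
--         N,rem=divmod(N,-2)
--         if rem<0:
--             rem=1
--             N+=1
--         lst.append(str(rem))
--     return "".join(lst)[::-1]
-- ===== SOURCE B (Python) =====
-- def baseNeg2(N: int) -> str:
--     # Schroeppel's bit trick: with mask M = 0b1010...10 (18 pairs, enough for |N| <= 2^31),
--     # the negabinary digits of N are exactly the binary digits of (N + M) ^ M.
--     M = 0xAAAAAAAAA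
--     return bin((N + M) ^ M)[2:]
-- ===== Notes on version B (the rewrite author's own statement) =====
-- stated objective: alternative
-- what changed: Replaces the divmod loop with list accumulation and final reversal by Schroeppel's closed-form bit trick: the negabinary digits of N are the binary digits of (N + 0xAAAAAAAAA) ^ 0xAAAAAAAAA, so B is one arithmetic expression plus bin().
import Mathlib
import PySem

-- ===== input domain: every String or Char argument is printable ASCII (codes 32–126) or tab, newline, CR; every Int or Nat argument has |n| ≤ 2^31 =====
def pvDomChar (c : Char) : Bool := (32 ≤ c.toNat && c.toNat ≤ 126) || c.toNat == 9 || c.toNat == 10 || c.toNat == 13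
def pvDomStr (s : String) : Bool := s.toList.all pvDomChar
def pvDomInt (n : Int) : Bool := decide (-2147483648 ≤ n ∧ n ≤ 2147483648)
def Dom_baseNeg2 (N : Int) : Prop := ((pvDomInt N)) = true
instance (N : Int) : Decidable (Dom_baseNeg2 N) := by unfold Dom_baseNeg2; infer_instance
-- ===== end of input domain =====

-- B replaces A's divmod loop + list accumulation + final [::-1] reversal by Schroeppel's
-- closed-form bit trick: the negabinary digits of N are the binary digits of
-- (N + 0xAAAAAAAAA) ^ 0xAAAAAAAAA (objective: alternative; mask wide enough for |N| ≤ 2^31).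

-- ===== PORT A =====
-- the while-loop: state is (N, lst); each pass appends str(rem) to lst.
-- fuel 2*|N|+1 bounds the number of passes (pvNeg2_dec_* below); it is never exhausted.
def baseNeg2_loop (fuel : Nat) (N : Int) (lst : List String) : List String :=
  match fuel with
  | 0 => lst
  | fuel + 1 =>
    if N = 0 then lst
    else
      -- N, rem = divmod(N, -2); if rem < 0: rem = 1; N += 1
      if PySem.Int.mod N (-2) < 0 then
        baseNeg2_loop fuel (PySem.Int.floordiv N (-2) + 1) (lst ++ [PySem.Int.toStr 1])
      else
        baseNeg2_loop fuel (PySem.Int.floordiv N (-2)) (lst ++ [PySem.Int.toStr (PySem.Int.mod N (-2))])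

def baseNeg2 (N : Int) : String :=
  if N = 0 then "0"
  else
    -- "".join(lst)[::-1]  (slice? with step -1 always returns some)
    match PySem.Str.slice? (PySem.Str.join "" (baseNeg2_loop (2 * N.natAbs + 1) N [])) none none (-1) with
    | some r => r
    | none => ""

-- ===== PORT B =====
-- bin(v) for v > 0, most-significant digit first (the '0b' prefix and the [2:] cancel)
def pyBinDigits (v : Nat) : String :=
  if v = 0 then ""
  else pyBinDigits (v / 2) ++ (if v % 2 = 1 then "1" else "0")
decreasing_by omega

-- bin((N + M) ^ M)[2:] with M = 0xAAAAAAAAA; the xor result is nonnegative on all of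
-- Dom (N ≥ -2^31 > -M), where .toNat is exact
def baseNeg2_alt (N : Int) : String :=
  if (PySem.Int.bxor (N + 45812984490) 45812984490).toNat = 0 then "0"
  else pyBinDigits (PySem.Int.bxor (N + 45812984490) 45812984490).toNat

-- ===== PRECONDITION & SPEC =====
def Spec_baseNeg2 (N : Int) (out : String) : Prop := out = baseNeg2_alt N
instance (N : Int) (out : String) : Decidable (Spec_baseNeg2 N out) := by unfold Spec_baseNeg2; infer_instance

-- ===== CLAIM (what is proved, stated in full; the proofs are below) =====
def Claim_equal_baseNeg2 : Prop := ∀ (N : Int), Dom_baseNeg2 N → Spec_baseNeg2 N (baseNeg2 N)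

-- ===== LEMMAS AND PROOFS =====

-- the Python iteration measure: it strictly drops each pass, so 2*|N|+1 fuel suffices
def pvNeg2Meas (n : Int) : Nat := 2 * n.natAbs + (if n < 0 then 1 else 0)

lemma pvNeg2_divmod (N : Int) :
    PySem.Int.floordiv N (-2) = (-N) / 2 ∧ PySem.Int.mod N (-2) = -((-N) % 2) := by
  have h1 := PySem.Int.floordiv_neg_neg (-N) 2
  have h2 := PySem.Int.mod_neg_neg (-N) 2
  simp only [neg_neg] at h1 h2
  rw [h1, h2, PySem.Int.floordiv_eq_ediv_of_pos (by omega), PySem.Int.mod_eq_emod_of_pos (by omega)]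
  exact ⟨rfl, rfl⟩

-- the canonical LSB-first negabinary digit list, digit = n % 2, next n = (n % 2 - n) / 2
def negaDigits (n : Int) : List Char :=
  if h : n = 0 then []
  else (if n % 2 = 1 then '1' else '0') :: negaDigits ((n % 2 - n) / 2)
termination_by pvNeg2Meas n
decreasing_by unfold pvNeg2Meas; split_ifs <;> omega

-- LSB-first binary digit list of a Nat
def binLSB (v : Nat) : List Char :=
  if v = 0 then []
  else (if v % 2 = 1 then '1' else '0') :: binLSB (v / 2)
decreasing_by omega

lemma pyBinDigits_toList (v : Nat) : (pyBinDigits v).toList = (binLSB v).reverse := by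
  induction v using pyBinDigits.induct with
  | case1 => rw [pyBinDigits, binLSB]; simp
  | case2 v hv ih =>
    rw [pyBinDigits, binLSB]
    simp only [hv, if_false, String.toList_append, ih]
    by_cases h : v % 2 = 1 <;> simp [h]

-- A's loop produces exactly negaDigits, LSB first
lemma join_nil_eq_flatten (xss : List (List Char)) :
    PySem.Chars.join [] xss = xss.flatten := by
  induction xss with
  | nil => simp [PySem.Chars.join_nil]
  | cons x rest ih =>
    cases rest with
    | nil => simp [PySem.Chars.join_singleton]
    | cons y t => rw [PySem.Chars.join_cons_cons]; simp_all

lemma join_empty_toList (lst : List String) :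
    (PySem.Str.join "" lst).toList = (lst.map String.toList).flatten := by
  simp [PySem.Str.join, join_nil_eq_flatten]

lemma loop_spec (fuel : Nat) : ∀ (N : Int) (lst : List String), pvNeg2Meas N ≤ fuel →
    (PySem.Str.join "" (baseNeg2_loop fuel N lst)).toList
      = (PySem.Str.join "" lst).toList ++ negaDigits N := by
  have h1 : (PySem.Int.toStr 1).toList = ['1'] := by decide
  have h0s : (PySem.Int.toStr 0).toList = ['0'] := by decide
  induction fuel with
  | zero =>
    intro N lst hf
    have hN : N = 0 := by unfold pvNeg2Meas at hf; split_ifs at hf <;> omega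
    rw [negaDigits.eq_def]
    simp [baseNeg2_loop, hN]
  | succ fuel ih =>
    intro N lst hf
    by_cases hN : N = 0
    · rw [negaDigits.eq_def]; simp [baseNeg2_loop, hN]
    · rw [baseNeg2_loop, negaDigits]
      rw [dif_neg hN]
      simp only [hN, if_false]
      obtain ⟨hq, hr⟩ := pvNeg2_divmod N
      have hm : pvNeg2Meas ((N % 2 - N) / 2) < pvNeg2Meas N := by
        unfold pvNeg2Meas; split_ifs <;> omega
      by_cases h : PySem.Int.mod N (-2) < 0
      · have hodd : N % 2 = 1 := by omega
        have hnext : PySem.Int.floordiv N (-2) + 1 = (N % 2 - N) / 2 := by omega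
        rw [if_pos h, hnext, ih _ _ (by omega), join_empty_toList, join_empty_toList]
        simp [h1, hodd]
      · have heven : ¬ N % 2 = 1 := by omega
        have h0 : PySem.Int.mod N (-2) = 0 := by omega
        have hnext : PySem.Int.floordiv N (-2) = (N % 2 - N) / 2 := by omega
        rw [if_neg h, hnext, ih _ _ (by omega), join_empty_toList, join_empty_toList]
        simp only [if_neg heven, h0]
        simp [show PySem.Int.toChars 0 = ['0'] from by decide]

-- the alternating masks: pvMe k = 0b1010…10 (k pairs), pvMo k = 0b0101…01 (k ones)
def pvMe : Nat → Nat
  | 0 => 0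
  | k + 1 => 4 * pvMe k + 2

def pvMo : Nat → Nat
  | 0 => 0
  | k + 1 => 4 * pvMo k + 1

lemma pvMe_eq (k : Nat) : pvMe k = 2 * pvMo k := by
  induction k with
  | zero => rfl
  | succ k ih => rw [pvMe, pvMo]; omega

-- Schroeppel, even-mask form: binary of (n + Me k) ^ Me k is negabinary of n
def EvenStmt (k : Nat) : Prop :=
  ∀ n : Int, -(pvMe k : Int) ≤ n → n ≤ (pvMo k : Int) →
    binLSB ((n + (pvMe k : Int)).toNat ^^^ pvMe k) = negaDigits n

-- odd-mask form: binary of (Mo (j+1) - n) ^ Mo (j+1) is negabinary of n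
def OddStmt (j : Nat) : Prop :=
  ∀ n : Int, -(pvMe j : Int) ≤ n → n ≤ (pvMo (j + 1) : Int) →
    binLSB (((pvMo (j + 1) : Int) - n).toNat ^^^ pvMo (j + 1)) = negaDigits n

lemma odd_of_even (j : Nat) (hE : EvenStmt j) : OddStmt j := by
  intro n hlo hhi
  have hMe := pvMe_eq j
  have hMo : pvMo (j + 1) = 2 * pvMe j + 1 := by rw [pvMo, pvMe_eq]; omega
  by_cases hn : n = 0
  · subst hn
    have hx : ((pvMo (j + 1) : Int) - 0).toNat = pvMo (j + 1) := by omega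
    rw [hx, Nat.xor_self, negaDigits.eq_def]
    simp [binLSB]
  · set x : Nat := ((pvMo (j + 1) : Int) - n).toNat with hxdef
    have hxv : (x : Int) = (pvMo (j + 1) : Int) - n := by omega
    have hvne : x ^^^ pvMo (j + 1) ≠ 0 := by
      simp only [ne_eq, Nat.xor_eq_zero_iff]; omega
    rw [binLSB, if_neg hvne, negaDigits.eq_def, dif_neg hn]
    set n' : Int := (n % 2 - n) / 2 with hn'def
    have hn2 : 2 * n' = n % 2 - n := by omega
    -- head digit: (x ^^^ Mo) % 2 = n % 2
    have hhead : (x ^^^ pvMo (j + 1)) % 2 = 1 ↔ n % 2 = 1 := by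
      rw [Nat.xor_mod_two_eq]; omega
    -- tail: (x ^^^ Mo) / 2 = (n' + Me j) ^^^ Me j
    have htail : (x ^^^ pvMo (j + 1)) / 2 = (n' + (pvMe j : Int)).toNat ^^^ pvMe j := by
      rw [Nat.xor_div_two]
      have hx2 : x / 2 = ((n' + (pvMe j : Int)).toNat : Nat) := by omega
      have hm2 : pvMo (j + 1) / 2 = pvMe j := by omega
      rw [hx2, hm2]
    rw [htail, hE n' (by omega) (by omega)]
    by_cases hpar : n % 2 = 1
    · rw [if_pos (hhead.mpr hpar), if_pos hpar]
    · rw [if_neg (fun hh => hpar (hhead.mp hh)), if_neg hpar]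

lemma even_succ_of_odd (j : Nat) (hO : OddStmt j) : EvenStmt (j + 1) := by
  intro n hlo hhi
  have hMe : pvMe (j + 1) = 2 * pvMo (j + 1) := pvMe_eq (j + 1)
  have hMo : pvMo (j + 1) = 2 * pvMe j + 1 := by rw [pvMo, pvMe_eq]; omega
  by_cases hn : n = 0
  · subst hn
    have hx : ((0 : Int) + (pvMe (j + 1) : Int)).toNat = pvMe (j + 1) := by omega
    rw [hx, Nat.xor_self, negaDigits.eq_def]
    simp [binLSB]
  · set x : Nat := (n + (pvMe (j + 1) : Int)).toNat with hxdef
    have hxv : (x : Int) = n + (pvMe (j + 1) : Int) := by omega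
    have hvne : x ^^^ pvMe (j + 1) ≠ 0 := by
      simp only [ne_eq, Nat.xor_eq_zero_iff]; omega
    rw [binLSB, if_neg hvne, negaDigits.eq_def, dif_neg hn]
    set n' : Int := (n % 2 - n) / 2 with hn'def
    have hn2 : 2 * n' = n % 2 - n := by omega
    have hhead : (x ^^^ pvMe (j + 1)) % 2 = 1 ↔ n % 2 = 1 := by
      rw [Nat.xor_mod_two_eq]; omega
    have htail : (x ^^^ pvMe (j + 1)) / 2
        = ((pvMo (j + 1) : Int) - n').toNat ^^^ pvMo (j + 1) := by
      rw [Nat.xor_div_two]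
      have hx2 : x / 2 = (((pvMo (j + 1) : Int) - n').toNat : Nat) := by omega
      have hm2 : pvMe (j + 1) / 2 = pvMo (j + 1) := by omega
      rw [hx2, hm2]
    rw [htail, hO n' (by omega) (by omega)]
    by_cases hpar : n % 2 = 1
    · rw [if_pos (hhead.mpr hpar), if_pos hpar]
    · rw [if_neg (fun hh => hpar (hhead.mp hh)), if_neg hpar]

lemma even_all (k : Nat) : EvenStmt k := by
  induction k with
  | zero =>
    intro n hlo hhi
    have hn : n = 0 := by simp [pvMe, pvMo] at hlo hhi; omega
    subst hn
    rw [negaDigits.eq_def]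
    simp [pvMe, binLSB]
  | succ j ih => exact even_succ_of_odd j (odd_of_even j ih)

lemma pvMe18 : pvMe 18 = 45812984490 := by rfl
lemma pvMo18 : pvMo 18 = 22906492245 := by rfl

-- ===== VERDICT (by name: the statement is the Claim_ definition above) =====
theorem baseNeg2_spec : Claim_equal_baseNeg2 := by
  intro N hD
  have hDom : -2147483648 ≤ N ∧ N ≤ 2147483648 := of_decide_eq_true hD
  have hnn : (0 : Int) ≤ N + 45812984490 := by omega
  have hbx : PySem.Int.bxor (N + 45812984490) 45812984490
      = ((N + 45812984490).toNat ^^^ (45812984490 : Int).toNat : Nat) :=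
    PySem.Int.bxor_of_nonneg hnn (by omega)
  have htn : (PySem.Int.bxor (N + 45812984490) 45812984490).toNat
      = (N + 45812984490).toNat ^^^ 45812984490 := by
    rw [hbx, show (45812984490 : Int).toNat = 45812984490 from rfl]; omega
  have hE := even_all 18 N (by rw [pvMe18]; push_cast; omega) (by rw [pvMo18]; push_cast; omega)
  rw [pvMe18] at hE
  have hcast : ((45812984490 : Nat) : Int) = 45812984490 := by norm_num
  rw [hcast] at hE
  unfold Spec_baseNeg2 baseNeg2 baseNeg2_alt
  rw [htn]
  by_cases hN : N = 0
  · subst hN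
    have h0 : ((0 : Int) + 45812984490).toNat ^^^ 45812984490 = 0 := by
      rw [Nat.xor_eq_zero_iff]; omega
    rw [if_pos rfl, h0, if_pos rfl]
  · have hv : (N + 45812984490).toNat ^^^ 45812984490 ≠ 0 := by
      simp only [ne_eq, Nat.xor_eq_zero_iff]; omega
    rw [if_neg hN, if_neg hv]
    rw [PySem.Str.slice?_none_none_neg_one]
    have hloop := loop_spec (2 * N.natAbs + 1) N []
      (by unfold pvNeg2Meas; split_ifs <;> omega)
    simp only [PySem.Str.join, List.map_nil, PySem.Chars.join_nil, String.toList_ofList,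
      List.nil_append] at hloop
    simp only [PySem.Str.join, String.toList_ofList]
    rw [hloop, ← hE, ← pyBinDigits_toList, String.ofList_toList]
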